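-- pv_equiv track=rewrite | github.com/ApacheEcho/RouteForceRouting | demo_label_system.py | categorize_labels
-- ===== SOURCE A (Python) =====
-- from typing import Dict, List
--
-- def categorize_labels(labels: List[Dict]) -> Dict[str, List[Dict]]:
--     """Categorize labels by their prefix."""
--     categories = {
--         'priority': [],
--         'type': [],
--         'status': [],
--         'component': [],
--         'special': []
--     }
--
--     for label in labels:
--         name = label['name']
--         if ':' in name:
--             category = name.split(':', 1)[0]
--             if category in categories:
--                 categories[category].append(label)
--             else:
--                 categories['special'].append(label)
--         else:
--             categories['special'].append(label)
--
--     return categories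
-- ===== SOURCE B (Python) =====
-- from typing import Dict, List
--
-- CATEGORY_KEYS = ['priority', 'type', 'status', 'component', 'special']
--
-- def _category_key(label) -> str:
--     """Map a label to its category key ('special' for no colon or unknown prefix)."""
--     name = label['name']
--     if ':' in name:
--         prefix = name.split(':', 1)[0]
--         return prefix if prefix in CATEGORY_KEYS else 'special'
--     return 'special'
--
-- def categorize_labels(labels: List[Dict]) -> Dict[str, List[Dict]]:
--     """Categorize labels by their prefix."""
--     return {key: [label for label in labels if _category_key(label) == key]
--             for key in CATEGORY_KEYS}
-- ===== Notes on version B (the rewrite author's own statement) =====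
-- stated objective: alternative
-- what changed: Replaces A's single dispatching pass that appends into a mutable dict of buckets with a per-category filter: a key-classifier helper plus a dict comprehension that scans the label list once per fixed category key.
import Mathlib
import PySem

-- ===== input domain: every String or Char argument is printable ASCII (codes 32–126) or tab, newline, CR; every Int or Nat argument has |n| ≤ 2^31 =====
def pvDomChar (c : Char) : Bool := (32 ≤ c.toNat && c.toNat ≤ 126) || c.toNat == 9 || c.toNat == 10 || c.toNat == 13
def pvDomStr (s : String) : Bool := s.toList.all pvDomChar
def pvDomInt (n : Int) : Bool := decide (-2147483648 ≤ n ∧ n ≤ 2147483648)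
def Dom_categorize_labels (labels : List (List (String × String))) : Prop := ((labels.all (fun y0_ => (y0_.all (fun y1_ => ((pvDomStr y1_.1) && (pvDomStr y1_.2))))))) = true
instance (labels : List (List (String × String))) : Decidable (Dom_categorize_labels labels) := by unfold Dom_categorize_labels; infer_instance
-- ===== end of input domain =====

-- B replaces A's single dispatching pass into a mutable dict of buckets by a key-classifier
-- helper plus one filter scan of the labels per fixed category key (objective: alternative).

-- ===== PORT A =====
def categorize_labels (labels : List (List (String × String))) : List (String × List (List (String × String))) :=
  let categories : PySem.Dict String (List (List (String × String))) :=
    PySem.Dict.mk [("priority", []), ("type", []), ("status", []), ("component", []), ("special", [])]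
  (labels.foldl (fun cats label =>
      -- label['name']: Pre_ guarantees the key is present (get? = none is Python's KeyError)
      let name := ((PySem.Dict.mk label).get? "name").getD ""
      if PySem.Str.isIn ":" name then
        let category := ((PySem.Str.splitMax? name ":" 1).getD []).headD ""
        if cats.contains category then cats.modify category [] (· ++ [label])
        else cats.modify "special" [] (· ++ [label])
      else cats.modify "special" [] (· ++ [label])) categories).items

-- ===== PORT B =====
def pvCategoryKeys : List String := ["priority", "type", "status", "component", "special"]

def pvCategoryKey (label : List (String × String)) : String :=
  let name := ((PySem.Dict.mk label).get? "name").getD ""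
  if PySem.Str.isIn ":" name then
    let prefixKey := ((PySem.Str.splitMax? name ":" 1).getD []).headD ""
    if prefixKey ∈ pvCategoryKeys then prefixKey else "special"
  else "special"

def categorize_labels_alt (labels : List (List (String × String))) : List (String × List (List (String × String))) :=
  pvCategoryKeys.map (fun key => (key, labels.filter (fun label => pvCategoryKey label == key)))

-- ===== PRECONDITION & SPEC =====
-- Pre_ excludes labels without a 'name' key, on which both A and B raise KeyError.
def Pre_categorize_labels (labels : List (List (String × String))) : Prop :=
  (labels.all (fun label => label.any (fun p => p.1 == "name"))) = true

instance (labels : List (List (String × String))) : Decidable (Pre_categorize_labels labels) := by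
  unfold Pre_categorize_labels; infer_instance

def pvWitness_categorize_labels : (List (List (String × String))) :=
  [[("name", "priority:high")], [("name", "plain")]]

def Spec_categorize_labels (labels : List (List (String × String)))
    (out : List (String × List (List (String × String)))) : Prop :=
  out = categorize_labels_alt labels

instance (labels : List (List (String × String))) (out : List (String × List (List (String × String)))) :
    Decidable (Spec_categorize_labels labels out) := by unfold Spec_categorize_labels; infer_instance

-- ===== CLAIM =====
def Claim_equal_categorize_labels : Prop :=
  ∀ (labels : List (List (String × String))), Dom_categorize_labels labels →
    Pre_categorize_labels labels → Spec_categorize_labels labels (categorize_labels labels)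

-- ===== LEMMAS AND PROOFS =====

-- The category key always lands in the fixed key list.
theorem pvCategoryKey_mem (label : List (String × String)) : pvCategoryKey label ∈ pvCategoryKeys := by
  unfold pvCategoryKey
  dsimp only
  split_ifs with h1 h2
  · exact h2
  · simp [pvCategoryKeys]
  · simp [pvCategoryKeys]

-- A's loop step, on a dict whose keys are the five fixed keys, is a modify at pvCategoryKey.
theorem pv_step_eq (d : PySem.Dict String (List (List (String × String))))
    (h : d.keys = pvCategoryKeys) (label : List (String × String)) :
    (let name := ((PySem.Dict.mk label).get? "name").getD ""
     if PySem.Str.isIn ":" name then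
       let category := ((PySem.Str.splitMax? name ":" 1).getD []).headD ""
       if d.contains category then d.modify category [] (· ++ [label])
       else d.modify "special" [] (· ++ [label])
     else d.modify "special" [] (· ++ [label]))
    = d.modify (pvCategoryKey label) [] (· ++ [label]) := by
  unfold pvCategoryKey
  simp only [PySem.Dict.contains_eq_decide_mem_keys, h]
  split
  · split
    · simp_all
    · simp_all
  · rfl

-- modify at a contained key keeps the keys.
theorem pv_keys_modify_mem (d : PySem.Dict String (List (List (String × String))))
    (h : d.keys = pvCategoryKeys) (label : List (String × String)) :
    (d.modify (pvCategoryKey label) [] (· ++ [label])).keys = pvCategoryKeys := by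
  rw [PySem.Dict.keys_modify, PySem.Dict.keys_insert_of_contains, h]
  rw [PySem.Dict.contains_eq_decide_mem_keys, h]
  simp [pvCategoryKey_mem]

-- A's fold equals the pure modify-at-key fold.
theorem pv_fold_eq (labels : List (List (String × String)))
    (d : PySem.Dict String (List (List (String × String)))) (h : d.keys = pvCategoryKeys) :
    labels.foldl (fun cats label =>
      let name := ((PySem.Dict.mk label).get? "name").getD ""
      if PySem.Str.isIn ":" name then
        let category := ((PySem.Str.splitMax? name ":" 1).getD []).headD ""
        if cats.contains category then cats.modify category [] (· ++ [label])
        else cats.modify "special" [] (· ++ [label])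
      else cats.modify "special" [] (· ++ [label])) d
    = labels.foldl (fun cats label => cats.modify (pvCategoryKey label) [] (· ++ [label])) d := by
  induction labels generalizing d with
  | nil => rfl
  | cons l t ih =>
    simp only [List.foldl_cons]
    rw [pv_step_eq d h l]
    exact ih _ (pv_keys_modify_mem d h l)

-- Each bucket of the modify-fold is B's filter.
theorem pv_getD_fold (labels : List (List (String × String)))
    (d : PySem.Dict String (List (List (String × String)))) (k : String) :
    (labels.foldl (fun cats label => cats.modify (pvCategoryKey label) [] (· ++ [label])) d).getD k []
    = d.getD k [] ++ labels.filter (fun label => pvCategoryKey label == k) := by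
  have h1 : labels.foldl (fun cats label => cats.modify (pvCategoryKey label) [] (· ++ [label])) d
      = (labels.map (fun label => (pvCategoryKey label, label))).foldl
          (fun cats p => cats.modify p.1 [] (· ++ [p.2])) d := by
    rw [List.foldl_map]
  rw [h1, PySem.Dict.getD_foldl_modify_append]
  simp [List.filter_map, Function.comp_def]

-- The keys of the modify-fold stay the five fixed keys.
theorem pv_keys_fold (labels : List (List (String × String)))
    (d : PySem.Dict String (List (List (String × String)))) (h : d.keys = pvCategoryKeys) :
    (labels.foldl (fun cats label => cats.modify (pvCategoryKey label) [] (· ++ [label])) d).keys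
    = pvCategoryKeys := by
  induction labels generalizing d with
  | nil => exact h
  | cons l t ih =>
    simp only [List.foldl_cons]
    exact ih _ (pv_keys_modify_mem d h l)

-- A dict with nodup keys is the map of getD over its keys.
theorem pv_items_eq_map_keys (d : PySem.Dict String (List (List (String × String))))
    (hnd : d.keys.Nodup) :
    d.items = d.keys.map (fun k => (k, d.getD k [])) := by
  have h : ∀ p ∈ d.items, (fun p : String × List (List (String × String)) => (p.1, d.getD p.1 [])) p = id p := by
    intro p hp
    have := PySem.Dict.getD_of_mem_items (d := d) (k := p.1) (v := p.2) (by simpa using hp) hnd []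
    simp [this]
  calc d.items = d.items.map (fun p => (p.1, d.getD p.1 [])) := by
        rw [List.map_congr_left h]; simp
    _ = (d.items.map Prod.fst).map (fun k => (k, d.getD k [])) := by
        simp [List.map_map, Function.comp_def]
    _ = d.keys.map (fun k => (k, d.getD k [])) := by
        rfl

-- ===== VERDICT =====
theorem categorize_labels_spec : Claim_equal_categorize_labels := by
  intro labels _ _
  unfold Spec_categorize_labels categorize_labels categorize_labels_alt
  simp only
  rw [pv_fold_eq labels _ (by decide)]
  set F := labels.foldl (fun cats label => cats.modify (pvCategoryKey label) [] (· ++ [label]))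
    (PySem.Dict.mk [("priority", []), ("type", []), ("status", []), ("component", []), ("special", [])]) with hF
  have hkeys : F.keys = pvCategoryKeys := pv_keys_fold labels _ (by decide)
  rw [pv_items_eq_map_keys F (by rw [hkeys]; decide), hkeys]
  apply List.map_congr_left
  intro k hk
  rw [hF, pv_getD_fold]
  fin_cases hk <;> simp [PySem.Dict.getD, PySem.Dict.get?]
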